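-- pv_equiv track=rewrite | github.com/ParkJeongmiin/Algorithm | 프로그래머스/unrated/172928. 공원 산책/공원 산책.py | solution
-- ===== SOURCE A (Python) =====
-- def solution(park, routes):
--     size_x, size_y = -1, -1
--     x, y = 0, 0
--
--     # 시작 위치, 공원 크기 구하기
--     for height in range(len(park)):
--         for width in range(len(park[height])):
--             if park[height][width] == 'S':
--                 x, y = height, width
--
--     size_x, size_y = height, width
--
--     # 이동 방향 정의
--     op = {'N' : (-1, 0), 'S' : (1, 0), 'W' : (0, -1), 'E' : (0, 1)}
--
--     # 명령에 따라 위치 이동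
--     for i in routes:
--         # 명령에 맞는 dx, dy 가져오기
--         dx, dy = op[i.split()[0]]
--         n = int(i.split()[1])
--
--         moved_x, moved_y = x, y     # 이동 하는 동안의 좌표
--         state = True                # 이동 가능한지 판단
--
--         # 이동
--         for _ in range(n):
--             nx = moved_x + dx
--             ny = moved_y + dy
--
--             # 공원 안 and 장애물 없다 => 이동 가능
--             if 0 <= nx <= size_x and 0 <= ny <= size_y and park[nx][ny] != 'X':
--                 state = True
--                 moved_x = nx
--                 moved_y = ny
--             else:
--                 state = False
--                 break
--
--         # 현재 위치로 업데이트
--         if state: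
--             x, y = nx, ny
--
--     return [x, y]
-- ===== SOURCE B (Python) =====
-- def find_start(park):
--     # last 'S' in row-major order = first 'S' when scanning bottom-up, right-to-left
--     for h in range(len(park) - 1, -1, -1):
--         row = park[h]
--         for w in range(len(row) - 1, -1, -1):
--             if row[w] == 'S':
--                 return h, w
--     return 0, 0
--
--
-- def prefix(line):
--     # pref[i] = number of 'X' among the first i cells of the line
--     acc = [0]
--     for c in line:
--         acc.append(acc[-1] + (c == 'X'))
--     return acc
--
--
-- def solution(park, routes):
--     rows, cols = len(park), len(park[-1])
--     x, y = find_start(park)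
--
--     # prefix counts of obstacles along every row and every column: a route is then
--     # validated by one O(1) range query instead of walking its cells.
--     rowpref = [prefix(row) for row in park]
--     colpref = [prefix(col) for col in zip(*park)]
--
--     op = {'N': (-1, 0), 'S': (1, 0), 'W': (0, -1), 'E': (0, 1)}
--     for r in routes:
--         toks = r.split()
--         dx, dy = op[toks[0]]
--         n = int(toks[1])
--         ex, ey = x + dx * n, y + dy * n
--         if not (0 <= ex < rows and 0 <= ey < cols):
--             continue
--         if dx == 0:
--             lo, hi = (y + 1, ey + 1) if dy > 0 else (ey, y)
--             blocked = rowpref[x][hi] - rowpref[x][lo]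
--         else:
--             lo, hi = (x + 1, ex + 1) if dx > 0 else (ex, x)
--             blocked = colpref[y][hi] - colpref[y][lo]
--         if blocked == 0:
--             x, y = ex, ey
--     return [x, y]
-- ===== Notes on version B (the rewrite author's own statement) =====
-- stated objective: alternative
-- what changed: Replaces A's per-route step-by-step walk (re-checking every cell with break/state flags) by precomputed per-row and per-column prefix counts of obstacles, so each route is validated by an endpoint bounds check plus one O(1) prefix-range query; the start is found by a bottom-up right-to-left scan with early return instead of A's full row-major scan with overwrite.
-- outside the precondition, e.g. on solution(['S'], ['E 1', 'N 0']): A returns [0, 1], B returns [0, 0]; on solution(['Sb', ''], ['E 1']): A returns [0, 1], B returns [0, 0]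
import Mathlib
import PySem

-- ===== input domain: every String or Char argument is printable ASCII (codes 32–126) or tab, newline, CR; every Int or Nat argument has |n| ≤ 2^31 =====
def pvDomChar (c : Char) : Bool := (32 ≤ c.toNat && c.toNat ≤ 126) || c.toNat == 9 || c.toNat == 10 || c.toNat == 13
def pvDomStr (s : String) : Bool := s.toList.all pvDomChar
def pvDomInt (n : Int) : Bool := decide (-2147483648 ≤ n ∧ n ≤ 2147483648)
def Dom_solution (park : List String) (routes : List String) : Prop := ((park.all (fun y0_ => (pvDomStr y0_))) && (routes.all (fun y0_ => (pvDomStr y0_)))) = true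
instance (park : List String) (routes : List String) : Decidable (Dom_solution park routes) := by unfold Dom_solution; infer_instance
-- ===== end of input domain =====

-- B replaces A's per-route step-and-break walk by precomputed row/column prefix counts of
-- obstacles (one O(1) range query per route) and an early-return bottom-up start scan.

-- the op dict both Python sources build
def opDict : PySem.Dict String (Int × Int) :=
  PySem.Dict.ofList [("N", (-1, 0)), ("S", (1, 0)), ("W", (0, -1)), ("E", (0, 1))]

-- ===== PORT A =====
-- inner S-scan over one row; state = ((x, y), (height, width)) with (height, width) the loop leftovers
def rowScanA (height : Int) (row : List Char) (st : (Int × Int) × Int × Int) :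
    (Int × Int) × Int × Int :=
  (PySem.List.pyRange 0 (PySem.List.len row) 1).foldl
    (fun st2 width =>
      (if PySem.List.pyGetD row width ' ' = 'S' then (height, width) else st2.1, height, width))
    st

-- the nested loops 'for height in range(len(park)): for width in range(len(park[height])): …'
def scanA (park : List String) : (Int × Int) × Int × Int :=
  (PySem.List.pyRange 0 (PySem.List.len park) 1).foldl
    (fun st height => rowScanA height (PySem.List.pyGetD park height "").toList st)
    ((0, 0), (-1, -1))

-- one route of A: state = ((x, y), (nx, ny)) with (nx, ny) the leftover loop variables
def stepRouteA (park : List String) (size_x size_y : Int)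
    (st : (Int × Int) × Int × Int) (i : String) : (Int × Int) × Int × Int :=
  let toks := PySem.Str.split₀ i
  let d := (opDict.get? (PySem.List.pyGetD toks 0 "")).getD (0, 0)
  let n := (PySem.Int.ofStr? (PySem.List.pyGetD toks 1 "")).getD 0
  let inner := (PySem.List.pyRange 0 n 1).foldl
    (fun (s : (Int × Int) × Bool × Int × Int) _ =>
      if s.2.1 = false then s          -- models the break: after it, iterations do nothing
      else
        let nx := s.1.1 + d.1
        let ny := s.1.2 + d.2
        if 0 ≤ nx ∧ nx ≤ size_x ∧ 0 ≤ ny ∧ ny ≤ size_y ∧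
            PySem.List.pyGetD (PySem.List.pyGetD park nx "").toList ny ' ' ≠ 'X'
        then ((nx, ny), true, nx, ny)
        else (s.1, false, nx, ny))
    (st.1, true, st.2)
  if inner.2.1 then ((inner.2.2.1, inner.2.2.2), inner.2.2.1, inner.2.2.2)
  else (st.1, inner.2.2.1, inner.2.2.2)

def solution (park : List String) (routes : List String) : List Int :=
  let scan := scanA park
  let final := routes.foldl (stepRouteA park scan.2.1 scan.2.2) (scan.1, scan.1)
  [final.1.1, final.1.2]

-- ===== PORT B =====
-- find_start: bottom-up, right-to-left scan; the early 'return' is an Option state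
def findStart (park : List String) : Int × Int :=
  ((PySem.List.pyRange (PySem.List.len park - 1) (-1) (-1)).foldl
    (fun (st : Option (Int × Int)) h =>
      if st.isSome then st else
        let row := (PySem.List.pyGetD park h "").toList
        (PySem.List.pyRange (PySem.List.len row - 1) (-1) (-1)).foldl
          (fun st2 w =>
            if st2.isSome then st2 else
              if PySem.List.pyGetD row w ' ' = 'S' then some (h, w) else st2)
          st)
    none).getD (0, 0)

-- prefix: acc grows by acc[-1] + (c == 'X')
def prefList (line : List Char) : List Int :=
  line.foldl
    (fun acc c => acc ++ [PySem.List.pyGetD acc (-1) 0 + (if c = 'X' then 1 else 0)])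
    [0]

-- zip(*park): the columns, truncating at the shortest row exactly like Python's zip
def zipStar (L : List (List Char)) : List (List Char) :=
  if h : L = [] ∨ L.any (·.isEmpty) then []
  else (L.map (fun r => r.headD ' ')) :: zipStar (L.map List.tail)
termination_by (L.headD []).length
decreasing_by
  rcases L with _ | ⟨r, rest⟩
  · simp at h
  · simp only [not_or, List.any_cons, Bool.or_eq_true, List.isEmpty_iff] at h
    obtain ⟨-, hr, -⟩ := h
    cases r with
    | nil => exact absurd rfl hr
    | cons a t => simp

-- one route of B: endpoint bounds check plus one prefix-range query
def stepRouteB (rowpref colpref : List (List Int)) (rows cols : Int)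
    (p : Int × Int) (r : String) : Int × Int :=
  let toks := PySem.Str.split₀ r
  let d := (opDict.get? (PySem.List.pyGetD toks 0 "")).getD (0, 0)
  let n := (PySem.Int.ofStr? (PySem.List.pyGetD toks 1 "")).getD 0
  let ex := p.1 + d.1 * n
  let ey := p.2 + d.2 * n
  if ¬ (0 ≤ ex ∧ ex < rows ∧ 0 ≤ ey ∧ ey < cols) then p
  else
    let blocked :=
      if d.1 = 0 then
        let lo := if 0 < d.2 then p.2 + 1 else ey
        let hi := if 0 < d.2 then ey + 1 else p.2
        PySem.List.pyGetD (PySem.List.pyGetD rowpref p.1 []) hi 0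
          - PySem.List.pyGetD (PySem.List.pyGetD rowpref p.1 []) lo 0
      else
        let lo := if 0 < d.1 then p.1 + 1 else ex
        let hi := if 0 < d.1 then ex + 1 else p.1
        PySem.List.pyGetD (PySem.List.pyGetD colpref p.2 []) hi 0
          - PySem.List.pyGetD (PySem.List.pyGetD colpref p.2 []) lo 0
    if blocked = 0 then (ex, ey) else p

def solution_alt (park : List String) (routes : List String) : List Int :=
  let rows := PySem.List.len park
  let cols := PySem.List.len (PySem.List.pyGetD park (-1) "").toList
  let start := findStart park
  let rowpref := park.map (fun row => prefList row.toList)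
  let colpref := (zipStar (park.map String.toList)).map prefList
  let final := routes.foldl (stepRouteB rowpref colpref rows cols) start
  [final.1, final.2]

-- ===== PRECONDITION & SPEC =====
-- Pre_ excludes empty or ragged parks and malformed or non-positive route commands: on those
-- A raises (NameError/KeyError/ValueError/IndexError) or returns coordinates left over from the
-- previous command's aborted move, while B simply stays put.
def Pre_solution (park : List String) (routes : List String) : Prop :=
  park ≠ [] ∧ (∃ row ∈ park, row.toList ≠ []) ∧
  (routes ≠ [] →
    (∀ row ∈ park, row.toList.length = (park.headD "").toList.length) ∧
    1 ≤ (park.headD "").toList.length ∧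
    ∀ i ∈ routes,
      PySem.List.pyGetD (PySem.Str.split₀ i) 0 "" ∈ (["N", "S", "W", "E"] : List String) ∧
      1 ≤ (PySem.Int.ofStr? (PySem.List.pyGetD (PySem.Str.split₀ i) 1 "")).getD 0)

instance (park : List String) (routes : List String) : Decidable (Pre_solution park routes) := by
  unfold Pre_solution; infer_instance

def pvWitness_solution : List String × List String := (["SO", "OX"], ["E 1", "S 1"])

def Spec_solution (park : List String) (routes : List String) (out : List Int) : Prop :=
  out = solution_alt park routes
instance (park : List String) (routes : List String) (out : List Int) :
    Decidable (Spec_solution park routes out) := by unfold Spec_solution; infer_instance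

-- ===== CLAIM (what is proved, stated in full; the proofs are below) =====
def Claim_equal_solution : Prop := ∀ (park : List String) (routes : List String),
  Dom_solution park routes → Pre_solution park routes →
  Spec_solution park routes (solution park routes)

-- ===== LEMMAS AND PROOFS =====

-- all S-positions in row-major order (proof-only helper shared by both sides' analyses)
def rowStarts (height : Int) (row : List Char) : List (Int × Int) :=
  (PySem.List.enumerate row 0).filterMap (fun wc =>
    if wc.2 = 'S' then some (height, wc.1) else none)

def allStarts (park : List String) : List (Int × Int) :=
  (PySem.List.enumerate park 0).flatMap (fun hr => rowStarts hr.1 hr.2.toList)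

lemma getD_or {α : Type} (o o' : Option α) (x : α) :
    (o'.or o).getD x = o'.getD (o.getD x) := by cases o' <;> simp

-- A's inner scan loop = last S of the row (default: previous), leftovers = (height, len-1)
lemma rowScanA_eq (height : Int) (row : List Char) (st : (Int × Int) × Int × Int) :
    rowScanA height row st =
      ((rowStarts height row).getLast?.getD st.1,
        if row = [] then st.2 else (height, (row.length : Int) - 1)) := by
  induction row using List.reverseRecOn with
  | nil =>
      simp [rowScanA, rowStarts, PySem.List.pyRange_one_eq_nil]
  | append_singleton cs c ih =>
      have hnn : (0 : Int) ≤ (cs.length : Int) := by positivity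
      have hsplit : PySem.List.pyRange 0 ((cs.length : Int) + 1) 1
          = PySem.List.pyRange 0 (cs.length : Int) 1 ++ [(cs.length : Int)] :=
        PySem.List.pyRange_one_succ_right hnn
      have hget : ∀ width : Int, 0 ≤ width → width < (cs.length : Int) →
          PySem.List.pyGetD (cs ++ [c]) width ' ' = PySem.List.pyGetD cs width ' ' := by
        intro width h0 h1
        rw [PySem.List.pyGetD_eq_getElem _ _ h0 (by simp; omega),
            PySem.List.pyGetD_eq_getElem _ _ h0 (by exact_mod_cast h1)]
        exact List.getElem_append_left (by omega)
      have hlast : PySem.List.pyGetD (cs ++ [c]) (cs.length : Int) ' ' = c := by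
        rw [PySem.List.pyGetD_eq_getElem _ _ hnn (by simp)]
        simp
      have hpref :
          (PySem.List.pyRange 0 (cs.length : Int) 1).foldl
            (fun st2 width =>
              (if PySem.List.pyGetD (cs ++ [c]) width ' ' = 'S' then (height, width) else st2.1,
                height, width)) st
          = rowScanA height cs st := by
        unfold rowScanA
        rw [PySem.List.len_eq]
        refine PySem.List.foldl_congr_mem _ _ _ _ ?_
        intro acc width hw
        rw [PySem.List.mem_pyRange_one] at hw
        rw [hget width hw.1 hw.2]
      have hstarts : rowStarts height (cs ++ [c])
          = rowStarts height cs ++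
              (if c = 'S' then [(height, (cs.length : Int))] else []) := by
        unfold rowStarts
        rw [PySem.List.enumerate_append, List.filterMap_append]
        congr 1
        simp only [PySem.List.enumerate_cons, PySem.List.enumerate_nil, zero_add,
          List.filterMap_cons, List.filterMap_nil]
        split_ifs <;> simp_all
      unfold rowScanA
      rw [show PySem.List.len (cs ++ [c]) = (cs.length : Int) + 1 by simp [PySem.List.len_eq],
          hsplit, List.foldl_append, hpref, ih, hstarts, List.getLast?_append, getD_or]
      by_cases hc : c = 'S'
      · simp [hc]
      · simp [hc, hlast]

-- A's nested scan = the last S of the whole park (default (0,0)), leftovers = sizes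
lemma scanGo_eq (park : List String) (hne : ∀ row ∈ park, row.toList ≠ [])
    (st : (Int × Int) × Int × Int) :
    (PySem.List.pyRange 0 (PySem.List.len park) 1).foldl
        (fun st height => rowScanA height (PySem.List.pyGetD park height "").toList st) st =
      ((allStarts park).getLast?.getD st.1,
        if park = [] then st.2
        else ((park.length : Int) - 1, (((park.getLast?.getD "").toList.length : Int) - 1))) := by
  induction park using List.reverseRecOn generalizing st with
  | nil => simp [allStarts, PySem.List.pyRange_one_eq_nil]
  | append_singleton ps r ih =>
      have hnn : (0 : Int) ≤ (ps.length : Int) := by positivity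
      have hsplit : PySem.List.pyRange 0 ((ps.length : Int) + 1) 1
          = PySem.List.pyRange 0 (ps.length : Int) 1 ++ [(ps.length : Int)] :=
        PySem.List.pyRange_one_succ_right hnn
      have hget : ∀ h : Int, 0 ≤ h → h < (ps.length : Int) →
          PySem.List.pyGetD (ps ++ [r]) h "" = PySem.List.pyGetD ps h "" := by
        intro h h0 h1
        rw [PySem.List.pyGetD_eq_getElem _ _ h0 (by simp; omega),
            PySem.List.pyGetD_eq_getElem _ _ h0 (by exact_mod_cast h1)]
        exact List.getElem_append_left (by omega)
      have hlastr : PySem.List.pyGetD (ps ++ [r]) (ps.length : Int) "" = r := by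
        rw [PySem.List.pyGetD_eq_getElem _ _ hnn (by simp)]
        simp
      have hpref :
          (PySem.List.pyRange 0 (ps.length : Int) 1).foldl
            (fun st height =>
              rowScanA height (PySem.List.pyGetD (ps ++ [r]) height "").toList st) st
          = (PySem.List.pyRange 0 (PySem.List.len ps) 1).foldl
            (fun st height =>
              rowScanA height (PySem.List.pyGetD ps height "").toList st) st := by
        rw [PySem.List.len_eq]
        refine PySem.List.foldl_congr_mem _ _ _ _ ?_
        intro acc h hw
        rw [PySem.List.mem_pyRange_one] at hw
        rw [hget h hw.1 hw.2]
      have hstarts : allStarts (ps ++ [r])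
          = allStarts ps ++ rowStarts (ps.length : Int) r.toList := by
        unfold allStarts
        rw [PySem.List.enumerate_append, List.flatMap_append]
        simp [PySem.List.enumerate_cons, PySem.List.enumerate_nil]
      have hrne : r.toList ≠ [] := hne r (by simp)
      rw [show PySem.List.len (ps ++ [r]) = (ps.length : Int) + 1 by simp [PySem.List.len_eq],
          hsplit, List.foldl_append, hpref,
          ih (fun row hrow => hne row (by simp [hrow]))]
      simp only [List.foldl_cons, List.foldl_nil]
      rw [hlastr, rowScanA_eq, hstarts, List.getLast?_append, getD_or]
      simp [hrne]

-- first component only (no shape assumptions): the scan's position is the last S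
lemma scanGoFst_eq (park : List String) (st : (Int × Int) × Int × Int) :
    ((PySem.List.pyRange 0 (PySem.List.len park) 1).foldl
        (fun st height => rowScanA height (PySem.List.pyGetD park height "").toList st) st).1 =
      (allStarts park).getLast?.getD st.1 := by
  induction park using List.reverseRecOn generalizing st with
  | nil => simp [allStarts, PySem.List.pyRange_one_eq_nil]
  | append_singleton ps r ih =>
      have hnn : (0 : Int) ≤ (ps.length : Int) := by positivity
      have hget : ∀ h : Int, 0 ≤ h → h < (ps.length : Int) →
          PySem.List.pyGetD (ps ++ [r]) h "" = PySem.List.pyGetD ps h "" := by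
        intro h h0 h1
        rw [PySem.List.pyGetD_eq_getElem _ _ h0 (by simp; omega),
            PySem.List.pyGetD_eq_getElem _ _ h0 (by exact_mod_cast h1)]
        exact List.getElem_append_left (by omega)
      have hlastr : PySem.List.pyGetD (ps ++ [r]) (ps.length : Int) "" = r := by
        rw [PySem.List.pyGetD_eq_getElem _ _ hnn (by simp)]
        simp
      have hpref :
          (PySem.List.pyRange 0 (ps.length : Int) 1).foldl
            (fun st height =>
              rowScanA height (PySem.List.pyGetD (ps ++ [r]) height "").toList st) st
          = (PySem.List.pyRange 0 (PySem.List.len ps) 1).foldl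
            (fun st height =>
              rowScanA height (PySem.List.pyGetD ps height "").toList st) st := by
        rw [PySem.List.len_eq]
        refine PySem.List.foldl_congr_mem _ _ _ _ ?_
        intro acc h hw
        rw [PySem.List.mem_pyRange_one] at hw
        rw [hget h hw.1 hw.2]
      have hstarts : allStarts (ps ++ [r])
          = allStarts ps ++ rowStarts (ps.length : Int) r.toList := by
        unfold allStarts
        rw [PySem.List.enumerate_append, List.flatMap_append]
        simp [PySem.List.enumerate_cons, PySem.List.enumerate_nil]
      rw [show PySem.List.len (ps ++ [r]) = (ps.length : Int) + 1 by simp [PySem.List.len_eq],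
          PySem.List.pyRange_one_succ_right hnn, List.foldl_append, hpref]
      simp only [List.foldl_cons, List.foldl_nil]
      rw [hlastr, rowScanA_eq, hstarts, List.getLast?_append, getD_or]
      simp only []
      rw [ih st]

-- B's inner right-to-left scan = the row's last S (kept if the state already holds one)
lemma innerFind_eq (h : Int) (cs : List Char) (st : Option (Int × Int)) :
    (PySem.List.pyRange (PySem.List.len cs - 1) (-1) (-1)).foldl
      (fun st2 w =>
        if st2.isSome then st2 else
          if PySem.List.pyGetD cs w ' ' = 'S' then some (h, w) else st2) st
    = st.or ((rowStarts h cs).getLast?) := by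
  induction cs using List.reverseRecOn generalizing st with
  | nil =>
      rw [show PySem.List.len ([] : List Char) - 1 = -1 by simp [PySem.List.len_eq],
          PySem.List.pyRange_neg_one_eq_nil (by omega)]
      simp [rowStarts, PySem.List.enumerate_nil]
  | append_singleton cs c ih =>
      have hlen : PySem.List.len (cs ++ [c]) - 1 = (cs.length : Int) := by
        simp [PySem.List.len_eq]
      have hcons : PySem.List.pyRange (cs.length : Int) (-1) (-1)
          = (cs.length : Int) :: PySem.List.pyRange ((cs.length : Int) - 1) (-1) (-1) :=
        PySem.List.pyRange_neg_one_cons (by omega)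
      have hlast : PySem.List.pyGetD (cs ++ [c]) (cs.length : Int) ' ' = c := by
        rw [PySem.List.pyGetD_eq_getElem _ _ (by positivity) (by simp)]
        simp
      have hget : ∀ w : Int, 0 ≤ w → w < (cs.length : Int) →
          PySem.List.pyGetD (cs ++ [c]) w ' ' = PySem.List.pyGetD cs w ' ' := by
        intro w h0 h1
        rw [PySem.List.pyGetD_eq_getElem _ _ h0 (by simp; omega),
            PySem.List.pyGetD_eq_getElem _ _ h0 (by exact_mod_cast h1)]
        exact List.getElem_append_left (by omega)
      have hstarts : rowStarts h (cs ++ [c])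
          = rowStarts h cs ++ (if c = 'S' then [(h, (cs.length : Int))] else []) := by
        unfold rowStarts
        rw [PySem.List.enumerate_append, List.filterMap_append]
        congr 1
        simp only [PySem.List.enumerate_cons, PySem.List.enumerate_nil, zero_add,
          List.filterMap_cons, List.filterMap_nil]
        split_ifs <;> simp_all
      rw [hlen, hcons]
      simp only [List.foldl_cons]
      have hcongr : ∀ st0 : Option (Int × Int),
          (PySem.List.pyRange ((cs.length : Int) - 1) (-1) (-1)).foldl
            (fun st2 w =>
              if st2.isSome then st2 else
                if PySem.List.pyGetD (cs ++ [c]) w ' ' = 'S' then some (h, w) else st2) st0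
          = (PySem.List.pyRange ((cs.length : Int) - 1) (-1) (-1)).foldl
            (fun st2 w =>
              if st2.isSome then st2 else
                if PySem.List.pyGetD cs w ' ' = 'S' then some (h, w) else st2) st0 := by
        intro st0
        refine PySem.List.foldl_congr_mem _ _ _ _ ?_
        intro acc w hw
        rw [PySem.List.mem_pyRange_neg_one] at hw
        rw [hget w (by omega) (by omega)]
      rw [hcongr]
      have hlen2 : ((cs.length : Int) - 1) = PySem.List.len cs - 1 := by
        simp [PySem.List.len_eq]
      rw [hlen2, ih]
      rw [hstarts, List.getLast?_append]
      cases st with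
      | none =>
          simp only [Option.isSome_none, Bool.false_eq_true, if_false, hlast, Option.none_or]
          by_cases hc : c = 'S' <;> simp [hc]
      | some p => simp

-- B's outer bottom-up scan with early return = the park's last S
lemma findStart_eq (park : List String) :
    findStart park = (allStarts park).getLast?.getD (0, 0) := by
  have main : ∀ (park : List String) (st : Option (Int × Int)),
      (PySem.List.pyRange (PySem.List.len park - 1) (-1) (-1)).foldl
        (fun (st : Option (Int × Int)) h =>
          if st.isSome then st else
            (PySem.List.pyRange
                (PySem.List.len (PySem.List.pyGetD park h "").toList - 1) (-1) (-1)).foldl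
              (fun st2 w =>
                if st2.isSome then st2 else
                  if PySem.List.pyGetD (PySem.List.pyGetD park h "").toList w ' ' = 'S'
                  then some (h, w) else st2)
              st)
        st = st.or ((allStarts park).getLast?) := by
    intro park
    induction park using List.reverseRecOn with
    | nil =>
        intro st
        rw [show PySem.List.len ([] : List String) - 1 = -1 by simp [PySem.List.len_eq],
            PySem.List.pyRange_neg_one_eq_nil (by omega)]
        simp [allStarts, PySem.List.enumerate_nil]
    | append_singleton ps r ih =>
        intro st
        have hlen : PySem.List.len (ps ++ [r]) - 1 = (ps.length : Int) := by
          simp [PySem.List.len_eq]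
        have hcons : PySem.List.pyRange (ps.length : Int) (-1) (-1)
            = (ps.length : Int) :: PySem.List.pyRange ((ps.length : Int) - 1) (-1) (-1) :=
          PySem.List.pyRange_neg_one_cons (by omega)
        have hlastr : PySem.List.pyGetD (ps ++ [r]) (ps.length : Int) "" = r := by
          rw [PySem.List.pyGetD_eq_getElem _ _ (by positivity) (by simp)]
          simp
        have hget : ∀ hh : Int, 0 ≤ hh → hh < (ps.length : Int) →
            PySem.List.pyGetD (ps ++ [r]) hh "" = PySem.List.pyGetD ps hh "" := by
          intro hh h0 h1
          rw [PySem.List.pyGetD_eq_getElem _ _ h0 (by simp; omega),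
              PySem.List.pyGetD_eq_getElem _ _ h0 (by exact_mod_cast h1)]
          exact List.getElem_append_left (by omega)
        have hstarts : allStarts (ps ++ [r])
            = allStarts ps ++ rowStarts (ps.length : Int) r.toList := by
          unfold allStarts
          rw [PySem.List.enumerate_append, List.flatMap_append]
          simp [PySem.List.enumerate_cons, PySem.List.enumerate_nil]
        rw [hlen, hcons]
        simp only [List.foldl_cons]
        -- first step: h = ps.length
        have hstep : (if st.isSome then st else
            (PySem.List.pyRange
                (PySem.List.len (PySem.List.pyGetD (ps ++ [r]) (ps.length : Int) "").toList - 1)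
                (-1) (-1)).foldl
              (fun st2 w =>
                if st2.isSome then st2 else
                  if PySem.List.pyGetD (PySem.List.pyGetD (ps ++ [r]) (ps.length : Int) "").toList
                      w ' ' = 'S'
                  then some ((ps.length : Int), w) else st2)
              st)
            = st.or ((rowStarts (ps.length : Int) r.toList).getLast?) := by
          rw [hlastr]
          cases st with
          | none =>
              simp only [Option.isSome_none, Bool.false_eq_true, if_false]
              rw [innerFind_eq]
          | some p => simp
        rw [hstep]
        have hcongr :
            (PySem.List.pyRange ((ps.length : Int) - 1) (-1) (-1)).foldl
              (fun (st : Option (Int × Int)) h =>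
                if st.isSome then st else
                  (PySem.List.pyRange
                      (PySem.List.len (PySem.List.pyGetD (ps ++ [r]) h "").toList - 1)
                      (-1) (-1)).foldl
                    (fun st2 w =>
                      if st2.isSome then st2 else
                        if PySem.List.pyGetD (PySem.List.pyGetD (ps ++ [r]) h "").toList w ' '
                            = 'S'
                        then some (h, w) else st2)
                    st)
              (st.or ((rowStarts (ps.length : Int) r.toList).getLast?))
            = (PySem.List.pyRange ((ps.length : Int) - 1) (-1) (-1)).foldl
              (fun (st : Option (Int × Int)) h =>
                if st.isSome then st else
                  (PySem.List.pyRange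
                      (PySem.List.len (PySem.List.pyGetD ps h "").toList - 1) (-1) (-1)).foldl
                    (fun st2 w =>
                      if st2.isSome then st2 else
                        if PySem.List.pyGetD (PySem.List.pyGetD ps h "").toList w ' ' = 'S'
                        then some (h, w) else st2)
                    st)
              (st.or ((rowStarts (ps.length : Int) r.toList).getLast?)) := by
          refine PySem.List.foldl_congr_mem _ _ _ _ ?_
          intro acc hh hw
          rw [PySem.List.mem_pyRange_neg_one] at hw
          rw [hget hh (by omega) (by omega)]
        rw [hcongr]
        have hlen2 : ((ps.length : Int) - 1) = PySem.List.len ps - 1 := by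
          simp [PySem.List.len_eq]
        rw [hlen2, ih]
        rw [hstarts, List.getLast?_append]
        cases st with
        | none => simp
        | some p => simp
  unfold findStart
  rw [main park none]
  simp

-- the prefix table of a line, characterised
lemma prefList_eq (cs : List Char) :
    prefList cs
      = (List.range (cs.length + 1)).map
          (fun i => ((cs.take i).countP (· == 'X') : Int)) := by
  induction cs using List.reverseRecOn with
  | nil => simp [prefList]
  | append_singleton cs c ih =>
      have hfold : prefList (cs ++ [c])
          = prefList cs ++ [PySem.List.pyGetD (prefList cs) (-1) 0
              + (if c = 'X' then 1 else 0)] := by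
        unfold prefList
        rw [List.foldl_append]
        simp
      have hlastval : PySem.List.pyGetD (prefList cs) (-1) 0
          = ((cs.countP (· == 'X') : Int)) := by
        rw [ih, List.range_succ, List.map_append, List.map_singleton,
            PySem.List.pyGetD_neg_one_append_singleton, List.take_length]
      rw [hfold, hlastval]
      conv_rhs =>
        rw [List.length_append, List.length_singleton, List.range_succ, List.map_append,
            List.map_singleton]
      rw [ih]
      congr 1
      · refine List.map_congr_left ?_
        intro i hi
        rw [List.mem_range] at hi
        rw [List.take_append_of_le_length (by omega)]
      · rw [List.take_of_length_le (by simp), List.countP_append]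
        simp only [List.countP_singleton]
        push_cast
        congr 1
        by_cases hc : c = 'X' <;> simp [hc]

lemma prefList_getD (cs : List Char) (i : Int) (h0 : 0 ≤ i) (h1 : i ≤ (cs.length : Int)) :
    PySem.List.pyGetD (prefList cs) i 0 = ((cs.take i.toNat).countP (· == 'X') : Int) := by
  rw [prefList_eq, PySem.List.pyGetD_eq_getElem _ _ h0 (by simp; omega)]
  rw [List.getElem_map, List.getElem_range]

-- a zero range query says exactly 'no X between lo and hi'
lemma rangeQuery_iff (cs : List Char) (lo hi : Nat) (hlo : lo ≤ hi) (hhi : hi ≤ cs.length) :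
    (((cs.take hi).countP (· == 'X') : Int) - ((cs.take lo).countP (· == 'X') : Int) = 0)
      ↔ ∀ j : Int, (lo : Int) ≤ j → j < (hi : Int) → PySem.List.pyGetD cs j ' ' ≠ 'X' := by
  have hsplit : cs.take hi = cs.take lo ++ (cs.drop lo).take (hi - lo) := by
    rw [← List.take_add, Nat.add_sub_cancel' hlo]
  rw [hsplit, List.countP_append]
  have h0 : (((cs.take lo).countP (· == 'X') : Int)
        + (((cs.drop lo).take (hi - lo)).countP (· == 'X') : Int)
        - ((cs.take lo).countP (· == 'X') : Int) = 0)
      ↔ ((cs.drop lo).take (hi - lo)).countP (· == 'X') = 0 := by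
    omega
  push_cast
  rw [h0, List.countP_eq_zero]
  constructor
  · intro h j hj1 hj2
    have hjn : j.toNat < cs.length := by omega
    rw [PySem.List.pyGetD_eq_getElem _ _ (by omega) (by omega)]
    intro hX
    have hmem : cs[j.toNat] ∈ (cs.drop lo).take (hi - lo) := by
      rw [List.mem_iff_getElem]
      refine ⟨j.toNat - lo, by simp; omega, ?_⟩
      rw [List.getElem_take, List.getElem_drop]
      congr 1
      omega
    have := h _ hmem
    simp [hX] at this
  · intro h x hx
    rw [List.mem_iff_getElem] at hx
    obtain ⟨k, hk, hkeq⟩ := hx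
    rw [List.getElem_take, List.getElem_drop] at hkeq
    have hklt : k < hi - lo := by
      simp at hk
      omega
    have := h ((lo + k : Nat) : Int) (by omega) (by push_cast; omega)
    rw [PySem.List.pyGetD_eq_getElem _ _ (by omega) (by push_cast; omega)] at this
    simp only [Int.toNat_natCast] at this
    rw [hkeq] at this
    simpa using this

-- zip(*park) on a rectangular park is the list of columns
lemma zipStar_eq (C : Nat) : ∀ L : List (List Char), (∀ r ∈ L, r.length = C) → L ≠ [] →
    zipStar L = (List.range C).map (fun w => L.map (fun r => r.getD w ' ')) := by
  induction C with
  | zero =>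
      intro L hrect hne
      rcases L with - | ⟨r, rest⟩
      · exact absurd rfl hne
      · rw [zipStar]
        rw [dif_pos]
        · simp
        · right
          simp only [List.any_cons, Bool.or_eq_true, List.isEmpty_iff]
          exact Or.inl (List.length_eq_zero_iff.mp (hrect r (by simp)))
  | succ C ih =>
      intro L hrect hne
      have hcond : ¬ (L = [] ∨ L.any (·.isEmpty) = true) := by
        rintro (h | h)
        · exact hne h
        · rw [List.any_eq_true] at h
          obtain ⟨r, hr, hre⟩ := h
          rw [List.isEmpty_iff] at hre
          have := hrect r hr
          rw [hre] at this
          simp at this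
      rw [zipStar, dif_neg hcond]
      have htails : ∀ r ∈ L.map List.tail, r.length = C := by
        intro r hr
        rw [List.mem_map] at hr
        obtain ⟨r0, hr0, rfl⟩ := hr
        have := hrect r0 hr0
        rw [List.length_tail, this]
        omega
      have htne : L.map List.tail ≠ [] := by
        intro h
        exact hne (List.map_eq_nil_iff.mp h)
      rw [ih _ htails htne, List.range_succ_eq_map, List.map_cons]
      congr 1
      · refine List.map_congr_left ?_
        intro r hr
        have hlen := hrect r hr
        cases r with
        | nil => simp at hlen
        | cons a t => simp
      · rw [List.map_map]
        refine List.map_congr_left ?_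
        intro w hw
        rw [Function.comp_apply, List.map_map]
        refine List.map_congr_left ?_
        intro r hr
        have hlen := hrect r hr
        cases r with
        | nil => simp at hlen
        | cons a t => simp

-- a cell of the straight segment is fine for A
def cellOK (park : List String) (R C : Nat) (dx dy x y k : Int) : Prop :=
  0 ≤ x + dx * k ∧ x + dx * k ≤ (R : Int) - 1 ∧ 0 ≤ y + dy * k ∧ y + dy * k ≤ (C : Int) - 1 ∧
    PySem.List.pyGetD (PySem.List.pyGetD park (x + dx * k) "").toList (y + dy * k) ' ' ≠ 'X'

-- A's movement loop, success case: it walks to the endpoint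
lemma innerA_success (park : List String) (R C : Nat) (dx dy x y : Int) :
    ∀ n : Int, 1 ≤ n →
    (∀ k ∈ PySem.List.pyRange 1 (n + 1) 1, cellOK park R C dx dy x y k) →
    ∀ nx0 ny0 : Int,
    (PySem.List.pyRange 0 n 1).foldl
        (fun (s : (Int × Int) × Bool × Int × Int) _ =>
          if s.2.1 = false then s
          else if 0 ≤ s.1.1 + dx ∧ s.1.1 + dx ≤ (R : Int) - 1 ∧ 0 ≤ s.1.2 + dy ∧
              s.1.2 + dy ≤ (C : Int) - 1 ∧
              PySem.List.pyGetD (PySem.List.pyGetD park (s.1.1 + dx) "").toList (s.1.2 + dy) ' '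
                ≠ 'X'
            then ((s.1.1 + dx, s.1.2 + dy), true, s.1.1 + dx, s.1.2 + dy)
            else (s.1, false, s.1.1 + dx, s.1.2 + dy))
        ((x, y), true, nx0, ny0) =
      ((x + dx * n, y + dy * n), true, x + dx * n, y + dy * n) := by
  intro n hn
  induction n, hn using Int.le_induction with
  | base =>
      intro hOK nx0 ny0
      obtain ⟨a1, a2, a3, a4, a5⟩ := hOK 1 (by rw [PySem.List.mem_pyRange_one]; omega)
      simp only [mul_one] at a1 a2 a3 a4 a5
      rw [show PySem.List.pyRange 0 1 1 = [(0 : Int)] from by decide]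
      simp only [List.foldl_cons, List.foldl_nil]
      rw [if_neg (by simp)]
      rw [if_pos ⟨a1, a2, a3, a4, a5⟩]
      simp [mul_one]
  | succ m hm ihm =>
      intro hOK nx0 ny0
      have hall : ∀ k ∈ PySem.List.pyRange 1 (m + 1) 1, cellOK park R C dx dy x y k := by
        intro k hk
        rw [PySem.List.mem_pyRange_one] at hk
        exact hOK k (by rw [PySem.List.mem_pyRange_one]; omega)
      rw [PySem.List.pyRange_one_succ_right (by omega : (0 : Int) ≤ m), List.foldl_append,
          ihm hall nx0 ny0]
      simp only [List.foldl_cons, List.foldl_nil]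
      obtain ⟨a1, a2, a3, a4, a5⟩ := hOK (m + 1) (by rw [PySem.List.mem_pyRange_one]; omega)
      rw [if_neg (by simp)]
      rw [show x + dx * m + dx = x + dx * (m + 1) from by ring,
          show y + dy * m + dy = y + dy * (m + 1) from by ring]
      rw [if_pos ⟨a1, a2, a3, a4, a5⟩]

-- A's movement loop, failure case: the state flag ends false
lemma innerA_fail (park : List String) (R C : Nat) (dx dy x y : Int) :
    ∀ n : Int, 0 ≤ n →
    (∃ k ∈ PySem.List.pyRange 1 (n + 1) 1, ¬ cellOK park R C dx dy x y k) →
    ∀ nx0 ny0 : Int,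
    ((PySem.List.pyRange 0 n 1).foldl
        (fun (s : (Int × Int) × Bool × Int × Int) _ =>
          if s.2.1 = false then s
          else if 0 ≤ s.1.1 + dx ∧ s.1.1 + dx ≤ (R : Int) - 1 ∧ 0 ≤ s.1.2 + dy ∧
              s.1.2 + dy ≤ (C : Int) - 1 ∧
              PySem.List.pyGetD (PySem.List.pyGetD park (s.1.1 + dx) "").toList (s.1.2 + dy) ' '
                ≠ 'X'
            then ((s.1.1 + dx, s.1.2 + dy), true, s.1.1 + dx, s.1.2 + dy)
            else (s.1, false, s.1.1 + dx, s.1.2 + dy))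
        ((x, y), true, nx0, ny0)).2.1 = false := by
  intro n hn
  induction n, hn using Int.le_induction with
  | base =>
      rintro ⟨k, hk, -⟩ nx0 ny0
      rw [PySem.List.mem_pyRange_one] at hk
      omega
  | succ m hm ihm =>
      intro hex nx0 ny0
      rw [PySem.List.pyRange_one_succ_right (by omega : (0 : Int) ≤ m), List.foldl_append]
      by_cases hpre : ∃ k ∈ PySem.List.pyRange 1 (m + 1) 1, ¬ cellOK park R C dx dy x y k
      · have hst := ihm hpre nx0 ny0
        simp only [List.foldl_cons, List.foldl_nil]
        rw [if_pos hst]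
        exact hst
      · -- all of [1..m] fine, so the failing index is m+1
        push Not at hpre
        obtain ⟨k, hk, hkbad⟩ := hex
        rw [PySem.List.mem_pyRange_one] at hk
        have hkm : k = m + 1 := by
          by_contra hne
          exact hkbad (hpre k (by rw [PySem.List.mem_pyRange_one]; omega))
        subst hkm
        simp only [cellOK] at hkbad
        rcases (by omega : m = 0 ∨ 1 ≤ m) with h0 | h1
        · subst h0
          simp only [PySem.List.pyRange_one_eq_nil (by omega : (0:Int) ≤ 0), List.foldl_nil,
            List.foldl_cons]
          rw [if_neg (by simp)]
          rw [show x + dx * (0 + 1) = x + dx from by ring,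
              show y + dy * (0 + 1) = y + dy from by ring] at hkbad
          exact if_neg hkbad ▸ rfl
        · rw [innerA_success park R C dx dy x y m h1 hpre nx0 ny0]
          simp only [List.foldl_cons, List.foldl_nil]
          rw [if_neg (by simp)]
          rw [show x + dx * m + dx = x + dx * (m + 1) from by ring,
              show y + dy * m + dy = y + dy * (m + 1) from by ring]
          exact if_neg hkbad ▸ rfl

-- position is inside the grid
def InB (R C : Nat) (p : Int × Int) : Prop :=
  0 ≤ p.1 ∧ p.1 < (R : Int) ∧ 0 ≤ p.2 ∧ p.2 < (C : Int)

-- one well-formed route on a rectangular park: A's step = B's step, and it stays inside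
lemma stepRoute_eq (park : List String) (R C : Nat) (hR : park.length = R)
    (hrect : ∀ row ∈ park, row.toList.length = C) (i : String)
    (hd : PySem.List.pyGetD (PySem.Str.split₀ i) 0 "" ∈ (["N", "S", "W", "E"] : List String))
    (hn : 1 ≤ (PySem.Int.ofStr? (PySem.List.pyGetD (PySem.Str.split₀ i) 1 "")).getD 0)
    (p : Int × Int) (hp : InB R C p) (w : Int × Int) :
    (stepRouteA park ((R : Int) - 1) ((C : Int) - 1) (p, w) i).1 =
        stepRouteB (park.map (fun row => prefList row.toList))
          ((zipStar (park.map String.toList)).map prefList) (R : Int) (C : Int) p i ∧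
      InB R C (stepRouteB (park.map (fun row => prefList row.toList))
          ((zipStar (park.map String.toList)).map prefList) (R : Int) (C : Int) p i) := by
  obtain ⟨px, py⟩ := p
  obtain ⟨hp1, hp2, hp3, hp4⟩ := hp
  dsimp only at hp1 hp2 hp3 hp4
  simp only [List.mem_cons, List.not_mem_nil, or_false] at hd
  set n := (PySem.Int.ofStr? (PySem.List.pyGetD (PySem.Str.split₀ i) 1 "")).getD 0 with hndef
  have hparkne : park ≠ [] := by
    intro hcontra
    rw [hcontra] at hR
    simp at hR
    omega
  have hLrect : ∀ r ∈ park.map String.toList, r.length = C := by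
    intro r hr
    rw [List.mem_map] at hr
    obtain ⟨s, hs, rfl⟩ := hr
    exact hrect s hs
  have hLne : park.map String.toList ≠ [] := by simpa using hparkne
  -- the row/column prefix tables, looked up
  have hrowF : ∀ x : Int, 0 ≤ x → x < (R : Int) →
      PySem.List.pyGetD (park.map (fun row => prefList row.toList)) x []
        = prefList (PySem.List.pyGetD park x "").toList := by
    intro x h0 h1
    rw [PySem.List.pyGetD_eq_getElem _ _ h0 (by simp [hR]; omega), List.getElem_map,
        PySem.List.pyGetD_eq_getElem _ _ h0 (by rw [hR]; exact h1)]
  have hcolF : ∀ v : Nat, v < C →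
      PySem.List.pyGetD ((zipStar (park.map String.toList)).map prefList) ((v : Nat) : Int) []
        = prefList ((park.map String.toList).map (fun r => r.getD v ' ')) := by
    intro v hv
    rw [zipStar_eq C _ hLrect hLne, PySem.List.pyGetD_natCast, List.map_map,
        List.getD_eq_getElem _ _ (by simp [hv]), List.getElem_map, List.getElem_range]
    rfl
  have hrowMem : ∀ x : Int, 0 ≤ x → x < (R : Int) →
      ((PySem.List.pyGetD park x "").toList.length : Int) = (C : Int) := by
    intro x h0 h1
    rw [PySem.List.pyGetD_eq_getElem _ _ h0 (by rw [hR]; exact h1)]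
    exact_mod_cast congrArg Nat.cast (hrect _ (List.getElem_mem _))
  have hcolLen : ∀ v : Nat,
      (((park.map String.toList).map (fun r => r.getD v ' ')).length : Int) = (R : Int) := by
    intro v
    simp [hR]
  have hcolCell : ∀ (v : Nat) (j : Int), v < C → 0 ≤ j → j < (R : Int) →
      PySem.List.pyGetD ((park.map String.toList).map (fun r => r.getD v ' ')) j ' '
        = PySem.List.pyGetD (PySem.List.pyGetD park j "").toList ((v : Nat) : Int) ' ' := by
    intro v j hv h0 h1
    rw [PySem.List.pyGetD_eq_getElem _ _ h0 (by simp [hR]; omega), List.getElem_map,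
        List.getElem_map, PySem.List.pyGetD_eq_getElem _ _ h0 (by rw [hR]; exact h1),
        PySem.List.pyGetD_natCast,
        List.getD_eq_getElem _ _ (by rw [hrect _ (List.getElem_mem _)]; exact hv)]
  -- generic per-direction argument
  have main : ∀ dx dy : Int,
      ((dx = -1 ∧ dy = 0) ∨ (dx = 1 ∧ dy = 0) ∨ (dx = 0 ∧ dy = -1) ∨ (dx = 0 ∧ dy = 1)) →
      (opDict.get? (PySem.List.pyGetD (PySem.Str.split₀ i) 0 "")).getD (0, 0) = (dx, dy) →
      (stepRouteA park ((R : Int) - 1) ((C : Int) - 1) ((px, py), w) i).1 =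
          stepRouteB (park.map (fun row => prefList row.toList))
            ((zipStar (park.map String.toList)).map prefList) (R : Int) (C : Int) (px, py) i ∧
        InB R C (stepRouteB (park.map (fun row => prefList row.toList))
            ((zipStar (park.map String.toList)).map prefList) (R : Int) (C : Int) (px, py) i) := by
    intro dx dy hdxy hop
    by_cases hB : 0 ≤ px + dx * n ∧ px + dx * n < (R : Int) ∧ 0 ≤ py + dy * n ∧
        py + dy * n < (C : Int)
    · -- endpoint in bounds: the prefix query decides, and it matches the cell-by-cell scan
      have hq : (if dx = 0 then
            (let lo := if 0 < dy then py + 1 else py + dy * n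
             let hi := if 0 < dy then py + dy * n + 1 else py
             PySem.List.pyGetD
                 (PySem.List.pyGetD (park.map (fun row => prefList row.toList)) px []) hi 0
               - PySem.List.pyGetD
                 (PySem.List.pyGetD (park.map (fun row => prefList row.toList)) px []) lo 0)
          else
            (let lo := if 0 < dx then px + 1 else px + dx * n
             let hi := if 0 < dx then px + dx * n + 1 else px
             PySem.List.pyGetD
                 (PySem.List.pyGetD ((zipStar (park.map String.toList)).map prefList) py []) hi 0
               - PySem.List.pyGetD
                 (PySem.List.pyGetD ((zipStar (park.map String.toList)).map prefList) py []) lo 0))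
            = 0
          ↔ ∀ k ∈ PySem.List.pyRange 1 (n + 1) 1,
              PySem.List.pyGetD (PySem.List.pyGetD park (px + dx * k) "").toList (py + dy * k) ' '
                ≠ 'X' := by
        rcases hdxy with ⟨e1, e2⟩ | ⟨e1, e2⟩ | ⟨e1, e2⟩ | ⟨e1, e2⟩ <;> subst e1 <;> subst e2
        · -- N: dx = -1, dy = 0; column py, range [px - n, px)
          rw [if_neg (by norm_num : ¬ (-1 : Int) = 0)]
          simp only [reduceIte]
          rw [show py = ((py.toNat : Nat) : Int) from by omega] at *
          rw [hcolF py.toNat (by omega)]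
          rw [prefList_getD _ _ (by omega) (by rw [hcolLen]; omega),
              prefList_getD _ _ (by omega) (by rw [hcolLen]; omega)]
          rw [rangeQuery_iff _ _ _ (by omega) (by have := hcolLen py.toNat; omega)]
          constructor
          · intro hall k hk
            rw [PySem.List.mem_pyRange_one] at hk
            have := hall (px + -1 * k) (by omega) (by omega)
            rw [hcolCell py.toNat (px + -1 * k) (by omega) (by omega) (by omega)] at this
            simpa using this
          · intro hall j hj1 hj2
            have := hall (px - j) (by rw [PySem.List.mem_pyRange_one]; omega)
            rw [show px + -1 * (px - j) = j from by ring] at this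
            rw [hcolCell py.toNat j (by omega) (by omega) (by omega)]
            simpa using this
        · -- S: dx = 1, dy = 0; column py, range (px, px + n]
          rw [if_neg (by norm_num : ¬ (1 : Int) = 0)]
          simp only [reduceIte]
          rw [show py = ((py.toNat : Nat) : Int) from by omega] at *
          rw [hcolF py.toNat (by omega)]
          rw [prefList_getD _ _ (by omega) (by rw [hcolLen]; omega),
              prefList_getD _ _ (by omega) (by rw [hcolLen]; omega)]
          rw [rangeQuery_iff _ _ _ (by omega) (by have := hcolLen py.toNat; omega)]
          constructor
          · intro hall k hk
            rw [PySem.List.mem_pyRange_one] at hk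
            have := hall (px + 1 * k) (by omega) (by omega)
            rw [hcolCell py.toNat (px + 1 * k) (by omega) (by omega) (by omega)] at this
            simpa using this
          · intro hall j hj1 hj2
            have := hall (j - px) (by rw [PySem.List.mem_pyRange_one]; omega)
            rw [show px + 1 * (j - px) = j from by ring] at this
            rw [hcolCell py.toNat j (by omega) (by omega) (by omega)]
            simpa using this
        · -- W: dx = 0, dy = -1; row px, range [py - n, py)
          rw [if_pos rfl]
          simp only [reduceIte]
          rw [hrowF px hp1 hp2]
          rw [prefList_getD _ _ (by omega) (by rw [hrowMem px hp1 hp2]; omega),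
              prefList_getD _ _ (by omega) (by rw [hrowMem px hp1 hp2]; omega)]
          rw [rangeQuery_iff _ _ _ (by omega) (by have := hrowMem px hp1 hp2; omega)]
          constructor
          · intro hall k hk
            rw [PySem.List.mem_pyRange_one] at hk
            have := hall (py + -1 * k) (by omega) (by omega)
            rw [show px + 0 * k = px from by ring]
            simpa using this
          · intro hall j hj1 hj2
            have := hall (py - j) (by rw [PySem.List.mem_pyRange_one]; omega)
            rw [show px + 0 * (py - j) = px from by ring,
                show py + -1 * (py - j) = j from by ring] at this
            simpa using this
        · -- E: dx = 0, dy = 1; row px, range (py, py + n]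
          rw [if_pos rfl]
          simp only [reduceIte]
          rw [hrowF px hp1 hp2]
          rw [prefList_getD _ _ (by omega) (by rw [hrowMem px hp1 hp2]; omega),
              prefList_getD _ _ (by omega) (by rw [hrowMem px hp1 hp2]; omega)]
          rw [rangeQuery_iff _ _ _ (by omega) (by have := hrowMem px hp1 hp2; omega)]
          constructor
          · intro hall k hk
            rw [PySem.List.mem_pyRange_one] at hk
            have := hall (py + 1 * k) (by omega) (by omega)
            rw [show px + 0 * k = px from by ring]
            simpa using this
          · intro hall j hj1 hj2
            have := hall (j - py) (by rw [PySem.List.mem_pyRange_one]; omega)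
            rw [show px + 0 * (j - py) = px from by ring,
                show py + 1 * (j - py) = j from by ring] at this
            simpa using this
      by_cases hA : ∀ k ∈ PySem.List.pyRange 1 (n + 1) 1, cellOK park R C dx dy px py k
      · -- every cell clear: A walks to the endpoint, B's query is zero
        have hcells : ∀ k ∈ PySem.List.pyRange 1 (n + 1) 1,
            PySem.List.pyGetD (PySem.List.pyGetD park (px + dx * k) "").toList (py + dy * k) ' '
              ≠ 'X' := fun k hk => (hA k hk).2.2.2.2
        constructor
        · show (stepRouteA _ _ _ _ _).1 = _
          unfold stepRouteA stepRouteB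
          simp only [hop, ← hndef]
          rw [innerA_success park R C dx dy px py n hn hA w.1 w.2]
          rw [if_pos rfl, if_neg (not_not_intro hB), if_pos (hq.mpr hcells)]
        · unfold stepRouteB
          simp only [hop, ← hndef]
          rw [if_neg (not_not_intro hB), if_pos (hq.mpr hcells)]
          exact ⟨hB.1, hB.2.1, hB.2.2.1, hB.2.2.2⟩
      · -- some cell blocked: A stays put, B's query is nonzero
        have hblocked : ¬ (if dx = 0 then
              (let lo := if 0 < dy then py + 1 else py + dy * n
               let hi := if 0 < dy then py + dy * n + 1 else py
               PySem.List.pyGetD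
                   (PySem.List.pyGetD (park.map (fun row => prefList row.toList)) px []) hi 0
                 - PySem.List.pyGetD
                   (PySem.List.pyGetD (park.map (fun row => prefList row.toList)) px []) lo 0)
            else
              (let lo := if 0 < dx then px + 1 else px + dx * n
               let hi := if 0 < dx then px + dx * n + 1 else px
               PySem.List.pyGetD
                   (PySem.List.pyGetD ((zipStar (park.map String.toList)).map prefList) py []) hi 0
                 - PySem.List.pyGetD
                   (PySem.List.pyGetD ((zipStar (park.map String.toList)).map prefList) py []) lo
                   0))
              = 0 := by
          intro h0
          apply hA
          intro k hk
          have hcell := hq.mp h0 k hk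
          rw [PySem.List.mem_pyRange_one] at hk
          refine ⟨?_, ?_, ?_, ?_, hcell⟩ <;>
            (rcases hdxy with ⟨e1, e2⟩ | ⟨e1, e2⟩ | ⟨e1, e2⟩ | ⟨e1, e2⟩ <;> subst e1 <;>
              subst e2 <;> omega)
        have hex : ∃ k ∈ PySem.List.pyRange 1 (n + 1) 1, ¬ cellOK park R C dx dy px py k := by
          push Not at hA
          exact hA
        constructor
        · show (stepRouteA _ _ _ _ _).1 = _
          unfold stepRouteA stepRouteB
          simp only [hop, ← hndef]
          have hfail := innerA_fail park R C dx dy px py n (by omega) hex w.1 w.2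
          simp only [hfail]
          rw [if_neg (not_not_intro hB), if_neg hblocked]
          simp
        · unfold stepRouteB
          simp only [hop, ← hndef]
          rw [if_neg (not_not_intro hB), if_neg hblocked]
          exact ⟨hp1, hp2, hp3, hp4⟩
    · -- endpoint out of bounds: B skips the move and A's walk fails at the last step
      have hex : ∃ k ∈ PySem.List.pyRange 1 (n + 1) 1, ¬ cellOK park R C dx dy px py k := by
        refine ⟨n, by rw [PySem.List.mem_pyRange_one]; omega, ?_⟩
        intro hc
        exact hB ⟨hc.1, by have := hc.2.1; omega, hc.2.2.1, by have := hc.2.2.2.1; omega⟩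
      constructor
      · show (stepRouteA _ _ _ _ _).1 = _
        unfold stepRouteA stepRouteB
        simp only [hop, ← hndef]
        have hfail := innerA_fail park R C dx dy px py n (by omega) hex w.1 w.2
        simp only [hfail]
        rw [if_pos hB]
        simp
      · unfold stepRouteB
        simp only [hop, ← hndef]
        rw [if_pos hB]
        exact ⟨hp1, hp2, hp3, hp4⟩

  rcases hd with h | h | h | h <;>
    [ exact main (-1) 0 (by norm_num) (by rw [h]; rfl);
      exact main 1 0 (by norm_num) (by rw [h]; rfl);
      exact main 0 (-1) (by norm_num) (by rw [h]; rfl);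
      exact main 0 1 (by norm_num) (by rw [h]; rfl) ]

-- the route fold: A's position component tracks B's position
lemma foldRoutes_eq (park : List String) (R C : Nat) (hR : park.length = R)
    (hrect : ∀ row ∈ park, row.toList.length = C) :
    ∀ routes : List String,
    (∀ i ∈ routes,
      PySem.List.pyGetD (PySem.Str.split₀ i) 0 "" ∈ (["N", "S", "W", "E"] : List String) ∧
      1 ≤ (PySem.Int.ofStr? (PySem.List.pyGetD (PySem.Str.split₀ i) 1 "")).getD 0) →
    ∀ (p : Int × Int), InB R C p → ∀ w : Int × Int,
    (routes.foldl (stepRouteA park ((R : Int) - 1) ((C : Int) - 1)) (p, w)).1 =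
      routes.foldl (stepRouteB (park.map (fun row => prefList row.toList))
        ((zipStar (park.map String.toList)).map prefList) (R : Int) (C : Int)) p := by
  intro routes
  induction routes with
  | nil => intro _ p _ w; rfl
  | cons i rest ih =>
      intro hwf p hp w
      simp only [List.foldl_cons]
      have hstep := stepRoute_eq park R C hR hrect i (hwf i (by simp)).1 (hwf i (by simp)).2 p hp w
      have hAstate : stepRouteA park ((R : Int) - 1) ((C : Int) - 1) (p, w) i
          = (stepRouteB (park.map (fun row => prefList row.toList))
              ((zipStar (park.map String.toList)).map prefList) (R : Int) (C : Int) p i,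
             (stepRouteA park ((R : Int) - 1) ((C : Int) - 1) (p, w) i).2) := by
        rw [← hstep.1]
      rw [hAstate]
      exact ih (fun j hj => hwf j (by simp [hj])) _ hstep.2 _

-- B's start lies inside the grid
lemma start_inB (park : List String) (R C : Nat) (hR : park.length = R) (hRpos : 1 ≤ R)
    (hC : 1 ≤ C) (hrect : ∀ row ∈ park, row.toList.length = C) :
    InB R C ((allStarts park).getLast?.getD (0, 0)) := by
  rcases hlast : (allStarts park).getLast? with - | p
  · simp only [Option.getD_none, InB]
    refine ⟨by norm_num, ?_, by norm_num, ?_⟩ <;> · show (0 : Int) < _; omega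
  · have hmem : p ∈ allStarts park := List.mem_of_getLast? hlast
    simp only [allStarts, rowStarts, List.mem_flatMap, List.mem_filterMap,
      PySem.List.mem_enumerate_iff] at hmem
    obtain ⟨hr, ⟨k, hk, hkeq⟩, wc, ⟨j, hj, hjeq⟩, hif⟩ := hmem
    split_ifs at hif with hS
    · obtain rfl := Option.some_injective _ hif
      subst hkeq hjeq
      have hrow : park[k].toList.length = C := hrect _ (by exact List.getElem_mem hk)
      have hj' : j < park[k].toList.length := hj
      simp only [Option.getD_some, InB]
      refine ⟨by simp, ?_, by simp, ?_⟩ <;> · simp only [zero_add]; omega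

-- ===== VERDICT (by name: the statement is the Claim_ definition above) =====
theorem solution_spec : Claim_equal_solution := by
  intro park routes _ hpre
  obtain ⟨hne, -, hwf⟩ := hpre
  show solution park routes = solution_alt park routes
  rcases routes with - | ⟨i, rest⟩
  · -- no routes: both sides are the start scan's position
    unfold solution solution_alt scanA
    simp only [List.foldl_nil]
    rw [scanGoFst_eq park ((0, 0), (-1, -1)), findStart_eq]
  · obtain ⟨hrect0, hC0, hroutes⟩ := hwf (by simp)
    have hne' : ∀ row ∈ park, row.toList ≠ [] := by
      intro row hr h
      have hlen := hrect0 row hr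
      rw [h] at hlen
      simp only [List.length_nil] at hlen
      omega
    have hRpos : 1 ≤ park.length := List.length_pos_of_ne_nil hne
    have hlastmem : park.getLast?.getD "" ∈ park := by
      rw [List.getLast?_eq_some_getLast hne]
      exact List.getLast_mem hne
    have hlastC : (park.getLast?.getD "").toList.length = (park.headD "").toList.length :=
      hrect0 _ hlastmem
    have hcols : (PySem.List.pyGetD park (-1) "").toList.length
        = (park.headD "").toList.length := by
      rw [PySem.List.pyGetD_neg_one _ _ hne]
      exact hrect0 _ (List.getLast_mem hne)
    unfold solution solution_alt scanA
    rw [scanGo_eq park hne' ((0, 0), (-1, -1))]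
    simp only [if_neg hne, hlastC, PySem.List.len_eq, hcols]
    rw [findStart_eq]
    have hfold := foldRoutes_eq park park.length (park.headD "").toList.length rfl hrect0
      (i :: rest) hroutes ((allStarts park).getLast?.getD (0, 0))
      (start_inB park park.length (park.headD "").toList.length rfl hRpos hC0 hrect0)
      ((allStarts park).getLast?.getD (0, 0))
    rw [hfold]
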